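-- pv_equiv track=rewrite | github.com/n0kkster/iu7-python-labs | sem_1/lab_12/12.py | check_align
-- ===== SOURCE A (Python) =====
-- def check_align(text):
-- 	if any(x[0] == ' ' and x[-1] == ' ' for x in text if len(set(x)) > 1):
-- 		return 'width'
--
-- 	if any(x[0] == ' ' for x in text if len(set(x)) > 1):
-- 		return 'right'
--
-- 	elif any('  ' in x for x in text if len(set(x)) > 1):
-- 		return 'width'
--
-- 	else:
-- 		return 'left'
-- ===== SOURCE B (Python) =====
-- def check_align(text):
--     both_ends = leading = double_space = False
--     for x in text:
--         if len(set(x)) <= 1: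
--             continue
--         both_ends = both_ends or (x[0] == ' ' and x[-1] == ' ')
--         leading = leading or x[0] == ' '
--         double_space = double_space or '  ' in x
--     if both_ends:
--         return 'width'
--     if leading:
--         return 'right'
--     if double_space:
--         return 'width'
--     return 'left'
-- ===== Notes on version B (the rewrite author's own statement) =====
-- stated objective: faster
-- what changed: Replaced A's three separate any(...) generator scans over text with one explicit loop that accumulates three boolean flags (both-ends-space, leading-space, double-space) and then runs the same result cascade, so text and each line's set(x) are traversed once instead of up to three times.
import Mathlib
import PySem

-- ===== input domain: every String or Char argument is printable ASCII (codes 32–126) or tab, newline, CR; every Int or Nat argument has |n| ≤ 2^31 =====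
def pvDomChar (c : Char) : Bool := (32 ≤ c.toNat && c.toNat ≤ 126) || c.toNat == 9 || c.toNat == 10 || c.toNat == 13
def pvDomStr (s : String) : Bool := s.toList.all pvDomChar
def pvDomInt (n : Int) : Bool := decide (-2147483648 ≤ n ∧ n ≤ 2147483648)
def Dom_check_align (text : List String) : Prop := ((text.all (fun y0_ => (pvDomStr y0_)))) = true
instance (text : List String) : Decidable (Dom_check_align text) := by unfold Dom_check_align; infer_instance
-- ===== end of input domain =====

-- B replaces A's three separate any(...) scans with one explicit loop accumulating three flags (alternative decomposition; same cascade).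

-- ===== PORT A =====
-- len(set(x)) > 1
def caGuard (x : String) : Bool := (PySem.Set.ofList x.toList).length > 1
-- x[0] == ' ' and x[-1] == ' '
def caBoth (x : String) : Bool :=
  PySem.Str.pyGet? x 0 == some ' ' && PySem.Str.pyGet? x (-1) == some ' '
-- x[0] == ' '
def caLead (x : String) : Bool := PySem.Str.pyGet? x 0 == some ' '
-- '  ' in x
def caDbl (x : String) : Bool := PySem.Str.isIn "  " x

def check_align (text : List String) : String :=
  if text.any (fun x => caGuard x && caBoth x) then "width"
  else if text.any (fun x => caGuard x && caLead x) then "right"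
  else if text.any (fun x => caGuard x && caDbl x) then "width"
  else "left"

-- ===== PORT B =====
-- one pass over text accumulating (both_ends, leading, double_space); lines with len(set(x)) <= 1 are skipped
def caStep (acc : Bool × Bool × Bool) (x : String) : Bool × Bool × Bool :=
  if caGuard x then
    (acc.1 || caBoth x, acc.2.1 || caLead x, acc.2.2 || caDbl x)
  else acc

def check_align_alt (text : List String) : String :=
  let flags := text.foldl caStep (false, false, false)
  if flags.1 then "width"
  else if flags.2.1 then "right"
  else if flags.2.2 then "width"
  else "left"

-- ===== PRECONDITION & SPEC =====
def Spec_check_align (text : List String) (out : String) : Prop := out = check_align_alt text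
instance (text : List String) (out : String) : Decidable (Spec_check_align text out) := by unfold Spec_check_align; infer_instance

-- ===== CLAIM (what is proved, stated in full; the proofs are below) =====
def Claim_equal_check_align : Prop := ∀ (text : List String), Dom_check_align text → Spec_check_align text (check_align text)

-- ===== LEMMAS AND PROOFS =====
lemma caFold_eq (text : List String) (a b c : Bool) :
    text.foldl caStep (a, b, c) =
      (a || text.any (fun x => caGuard x && caBoth x),
       b || text.any (fun x => caGuard x && caLead x),
       c || text.any (fun x => caGuard x && caDbl x)) := by
  induction text generalizing a b c with
  | nil => simp
  | cons h t ih =>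
    simp only [List.foldl_cons, List.any_cons, caStep]
    by_cases hg : caGuard h
    · simp [hg, ih, Bool.or_assoc]
    · simp [hg, ih]

-- ===== VERDICT (by name: the statement is the Claim_ definition above) =====
theorem check_align_spec : Claim_equal_check_align := by
  intro text _
  unfold Spec_check_align check_align check_align_alt
  simp only [caFold_eq, Bool.false_or]
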